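-- pv_equiv track=rewrite | github.com/anatatar10/Algorithms_And_Programming | Labs/Lab2/utilities/sortedScoreListHigher.py | sortedScoreListHigher
-- ===== SOURCE A (Python) =====
-- def sortedScoreListHigher(score_list, value): ## the function sortes the participants with scores higher than the given value
--     if value < 0 or value > 10:
--         raise ValueError("Value not valid!")
--     listParticipantsHigher = [] ## empty list to store the sorted participants with scores higher than the given value
--     for i in range(0, len(score_list)): ## the function goes through the list
--         if int(score_list[i]) > value: ## the function checks if the element is greater than the given value
--             listParticipantsHigher.append(i) ## if the elements is higher, the index of the participant is added to the list
--     for i in range(0, len(listParticipantsHigher)): ## the function goes through the list until the last but one element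
--         for j in range(i+1, len(listParticipantsHigher)): ## the function goes through the list from the i+1 index until the last element
--             if(listParticipantsHigher[i] > listParticipantsHigher[j]): ## the function compares two consecutive elements and checks if the first is greater than the second one
--                 aux = listParticipantsHigher ## the first element is saved as an auxiliar variablle
--                 listParticipantsHigher[i] = listParticipantsHigher[j] ## the first element gets the value of the second one
--                 listParticipantsHigher[i] = aux ## the second elements gets the value of the first one saved as the auxiliar variable
--     return listParticipantsHigher ## the function returns the new list
-- ===== SOURCE B (Python) =====
-- def sortedScoreListHigher(score_list, value):
--     if value < 0 or value > 10:
--         raise ValueError("Value not valid!")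
--     # indices are produced in increasing order, so they are already sorted
--     return [i for i, s in enumerate(score_list) if int(s) > value]
-- ===== Notes on version B (the rewrite author's own statement) =====
-- stated objective: simpler
-- what changed: A's nested O(n^2) 'sort' loop is provably dead (indices are appended in increasing order, so its swap condition never fires, and its swap is broken anyway); B is a single filtering enumerate-comprehension returning the indices directly.
import Mathlib
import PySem

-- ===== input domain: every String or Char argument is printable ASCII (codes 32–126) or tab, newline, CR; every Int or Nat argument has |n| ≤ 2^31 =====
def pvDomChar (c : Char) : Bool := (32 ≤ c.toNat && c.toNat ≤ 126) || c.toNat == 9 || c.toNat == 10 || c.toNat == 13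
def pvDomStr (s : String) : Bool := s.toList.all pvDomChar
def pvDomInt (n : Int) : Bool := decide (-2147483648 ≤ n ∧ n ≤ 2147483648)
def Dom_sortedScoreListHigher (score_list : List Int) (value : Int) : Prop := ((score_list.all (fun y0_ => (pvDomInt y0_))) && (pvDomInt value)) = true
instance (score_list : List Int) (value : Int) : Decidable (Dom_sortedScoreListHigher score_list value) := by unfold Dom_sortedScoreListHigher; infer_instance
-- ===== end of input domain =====

-- B replaces A's index loop + dead nested "sort" loop with one filtering enumerate pass (simpler; same values).


-- ===== PORT A =====
-- first loop of A: collect indices i with score_list[i] > value (int() on an int is the identity)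
def pvCollectA (score_list : List Int) (value : Int) : List Int :=
  (PySem.List.pyRange 0 (score_list.length : Int) 1).foldl
    (fun acc i => if PySem.List.pyGetD score_list i 0 > value then acc ++ [i] else acc) []

-- second (nested) loop of A. Its branch is unreachable (the collected indices are strictly
-- increasing, proved below); the Python branch would store the WHOLE list into cell i
-- (aux = list; l[i] = l[j]; l[i] = aux), which is untypeable under List Int, so the branch
-- is ported as the last typeable assignment l[i] = l[j]; this is exact on every reachable path.
def pvSortLoopA (l : List Int) : List Int :=
  (PySem.List.pyRange 0 (l.length : Int) 1).foldl
    (fun cur i =>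
      (PySem.List.pyRange (i + 1) (cur.length : Int) 1).foldl
        (fun cur2 j =>
          if PySem.List.pyGetD cur2 i 0 > PySem.List.pyGetD cur2 j 0 then
            PySem.List.pySetD cur2 i (PySem.List.pyGetD cur2 j 0)
          else cur2) cur) l

-- Python raises ValueError when value < 0 or value > 10; those inputs are excluded by Pre_ below.
def sortedScoreListHigher (score_list : List Int) (value : Int) : List Int :=
  if value < 0 ∨ value > 10 then []
  else pvSortLoopA (pvCollectA score_list value)

-- ===== PORT B =====
def sortedScoreListHigher_alt (score_list : List Int) (value : Int) : List Int :=
  if value < 0 ∨ value > 10 then []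
  else ((PySem.List.enumerate score_list).filter (fun p => p.2 > value)).map (·.1)

-- ===== PRECONDITION & SPEC =====
-- Pre_ excludes exactly the inputs where the Python A raises ValueError (value < 0 or value > 10).
def Pre_sortedScoreListHigher (score_list : List Int) (value : Int) : Prop :=
  0 ≤ value ∧ value ≤ 10
instance (score_list : List Int) (value : Int) : Decidable (Pre_sortedScoreListHigher score_list value) := by unfold Pre_sortedScoreListHigher; infer_instance

def pvWitness_sortedScoreListHigher : List Int × Int := ([3, 9, 1, 10, 7], 5)

def Spec_sortedScoreListHigher (score_list : List Int) (value : Int) (out : List Int) : Prop := out = sortedScoreListHigher_alt score_list value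
instance (score_list : List Int) (value : Int) (out : List Int) : Decidable (Spec_sortedScoreListHigher score_list value out) := by unfold Spec_sortedScoreListHigher; infer_instance

-- ===== CLAIM (what is proved, stated in full; the proofs are below) =====
def Claim_equal_sortedScoreListHigher : Prop := ∀ (score_list : List Int) (value : Int), Dom_sortedScoreListHigher score_list value → Pre_sortedScoreListHigher score_list value → Spec_sortedScoreListHigher score_list value (sortedScoreListHigher score_list value)

-- ===== LEMMAS AND PROOFS =====

-- a fold whose step fixes the accumulator on every element of the list is the identity
theorem pvFoldlId {α β : Type} (L : List β) (f : α → β → α) (a : α)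
    (h : ∀ x ∈ L, f a x = a) : L.foldl f a = a := by
  induction L with
  | nil => rfl
  | cons x xs ih =>
      simp only [List.foldl_cons, h x (by simp)]
      exact ih (fun y hy => h y (by simp [hy]))

-- A's first loop equals B's comprehension
theorem pvCollectA_eq (score_list : List Int) (value : Int) :
    pvCollectA score_list value
      = ((PySem.List.enumerate score_list).filter (fun p => p.2 > value)).map (·.1) := by
  unfold pvCollectA
  rw [PySem.List.foldl_append_ite_eq_filter]
  rw [PySem.List.enumerate_eq_map_pyRange score_list 0]
  rw [List.filter_map, List.map_map]
  simp [Function.comp_def]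

-- the collected index list is strictly increasing
theorem pvCollectA_pairwise (score_list : List Int) (value : Int) :
    (pvCollectA score_list value).Pairwise (· < ·) := by
  rw [pvCollectA_eq]
  exact ((PySem.List.pairwise_lt_enumerate score_list 0).filter _).map _ (fun _ _ h => h)

-- A's nested "sort" loop is the identity on a strictly increasing list
theorem pvSortLoopA_id (l : List Int) (hl : l.Pairwise (· < ·)) : pvSortLoopA l = l := by
  unfold pvSortLoopA
  apply pvFoldlId
  intro i hi
  apply pvFoldlId
  intro j hj
  rw [PySem.List.mem_pyRange_one] at hi hj
  obtain ⟨hi0, hilen⟩ := hi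
  obtain ⟨hj0, hjlen⟩ := hj
  have hgi : PySem.List.pyGetD l i 0 = l[i.toNat]'(by omega) :=
    PySem.List.pyGetD_eq_getElem l 0 hi0 (by omega)
  have hgj : PySem.List.pyGetD l j 0 = l[j.toNat]'(by omega) :=
    PySem.List.pyGetD_eq_getElem l 0 (by omega) hjlen
  have hlt : l[i.toNat]'(by omega) < l[j.toNat]'(by omega) :=
    List.pairwise_iff_getElem.mp hl i.toNat j.toNat (by omega) (by omega) (by omega)
  rw [hgi, hgj, if_neg (by omega)]

-- ===== VERDICT (by name: the statement is the Claim_ definition above) =====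
theorem sortedScoreListHigher_spec : Claim_equal_sortedScoreListHigher := by
  intro score_list value _ hpre
  obtain ⟨h0, h10⟩ := hpre
  unfold Spec_sortedScoreListHigher sortedScoreListHigher sortedScoreListHigher_alt
  rw [if_neg (by omega), if_neg (by omega)]
  rw [pvSortLoopA_id _ (pvCollectA_pairwise score_list value), pvCollectA_eq]
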